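-- pv_equiv track=rewrite | github.com/IGarbur/Bioinformatics.v1 | overlap_graphs.py | get_sufixes
-- ===== SOURCE A (Python) =====
-- def get_sufixes(form):
--     sufixes = {}
--     for key,val in form.items():
--         sufix = val[len(val)-3:]
--         if sufix in sufixes:
--             sufixes[sufix].append(key)
--         else:
--             sufixes[sufix]=[key]
--     return sufixes
-- ===== SOURCE B (Python) =====
-- def get_sufixes(form):
--     # Same result as A, computed by a different decomposition:
--     # first collect the distinct suffixes in first-occurrence order,
--     # then gather, per suffix, all keys whose value has that suffix.
--     items = list(form.items())
--     sufs = []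
--     for _k, v in items:
--         s = v[len(v) - 3:]
--         if s not in sufs:
--             sufs.append(s)
--     return {s: [k for k, v in items if v[len(v) - 3:] == s] for s in sufs}
-- ===== Notes on version B (the rewrite author's own statement) =====
-- stated objective: alternative
-- what changed: A buckets keys incrementally into a dict of lists in one pass; B first computes the distinct suffixes in first-occurrence order and then builds each group by a filtering pass over the items, with no incremental dict state.
import Mathlib
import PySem

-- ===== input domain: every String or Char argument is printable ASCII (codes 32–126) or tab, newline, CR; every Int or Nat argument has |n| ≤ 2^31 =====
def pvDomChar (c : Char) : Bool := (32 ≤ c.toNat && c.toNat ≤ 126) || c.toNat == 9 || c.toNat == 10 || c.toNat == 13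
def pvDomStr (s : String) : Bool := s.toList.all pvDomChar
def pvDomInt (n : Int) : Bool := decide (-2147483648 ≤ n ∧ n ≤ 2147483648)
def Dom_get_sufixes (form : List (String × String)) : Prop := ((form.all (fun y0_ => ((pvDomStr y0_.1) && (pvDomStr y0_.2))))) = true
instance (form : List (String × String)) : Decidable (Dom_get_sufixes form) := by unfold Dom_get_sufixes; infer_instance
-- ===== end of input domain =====

-- B computes the same grouping by a different decomposition (distinct suffixes first, then one
-- filtering pass per suffix) instead of A's incremental dict-of-lists bucketing; same cost class.

-- shared helper: the suffix expression val[len(val)-3:] appearing verbatim in both sources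
def pvSuf3 (val : String) : String :=
  PySem.Str.slice val (some (PySem.Str.len val - 3)) none

-- ===== PORT A =====
def get_sufixes (form : List (String × String)) : List (String × List String) :=
  (form.foldl
    (fun (sufixes : PySem.Dict String (List String)) kv =>
      let sufix := pvSuf3 kv.2
      if sufixes.contains sufix then
        sufixes.modify sufix [] (fun l => l ++ [kv.1])   -- sufixes[sufix].append(key)
      else
        sufixes.insert sufix [kv.1])                     -- sufixes[sufix] = [key]
    PySem.Dict.empty).items

-- ===== PORT B =====
def get_sufixes_alt (form : List (String × String)) : List (String × List String) :=
  let sufs : List String :=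
    form.foldl (fun sufs kv =>
      let s := pvSuf3 kv.2
      if s ∈ sufs then sufs else sufs ++ [s]) []
  sufs.map (fun s => (s, (form.filter (fun kv => pvSuf3 kv.2 == s)).map (fun kv => kv.1)))

-- ===== PRECONDITION & SPEC =====
-- Pre_ excludes association lists with duplicate keys: they do not represent a Python dict
-- (dict construction keeps one entry per key), so the assoc-list behaviour there is nobody's.
def Pre_get_sufixes (form : List (String × String)) : Prop := (form.map Prod.fst).Nodup
instance (form : List (String × String)) : Decidable (Pre_get_sufixes form) := by
  unfold Pre_get_sufixes; infer_instance
def pvWitness_get_sufixes : (List (String × String)) := [("ab", "GATTACA"), ("cd", "TT")]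
def Spec_get_sufixes (form : List (String × String)) (out : List (String × List String)) : Prop := out = get_sufixes_alt form
instance (form : List (String × String)) (out : List (String × List String)) : Decidable (Spec_get_sufixes form out) := by unfold Spec_get_sufixes; infer_instance

-- ===== CLAIM (what is proved, stated in full; the proofs are below) =====
def Claim_equal_get_sufixes : Prop := ∀ (form : List (String × String)), Dom_get_sufixes form → Pre_get_sufixes form → Spec_get_sufixes form (get_sufixes form)

-- ===== LEMMAS AND PROOFS =====

-- A's branch is exactly an unconditional Dict.modify step.
theorem pvStepA_eq_modify (d : PySem.Dict String (List String)) (kv : String × String) :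
    (let sufix := pvSuf3 kv.2;
     if d.contains sufix then d.modify sufix [] (fun l => l ++ [kv.1])
     else d.insert sufix [kv.1])
    = d.modify (pvSuf3 kv.2) [] (fun l => l ++ [kv.1]) := by
  by_cases h : d.contains (pvSuf3 kv.2)
  · simp [h]
  · have hg : d.getD (pvSuf3 kv.2) [] = [] :=
      PySem.Dict.getD_of_not_contains d [] (by simpa using h)
    simp [h, PySem.Dict.modify, hg]

-- B's accumulator loop is the PySem.Set fold.
theorem pvSufsFold_eq (form : List (String × String)) (s : PySem.Set String) :
    form.foldl (fun sufs kv => let x := pvSuf3 kv.2;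
      if x ∈ sufs then sufs else sufs ++ [x]) s
    = form.foldl (fun sufs kv => PySem.Set.add sufs (pvSuf3 kv.2)) s := by
  induction form generalizing s with
  | nil => rfl
  | cons kv rest ih =>
      simp only [List.foldl_cons]
      rw [ih]
      congr 1
      simp [PySem.Set.add, PySem.Set.contains]

theorem get_sufixes_eq_alt (form : List (String × String)) :
    get_sufixes form = get_sufixes_alt form := by
  unfold get_sufixes get_sufixes_alt
  have hfold :
      form.foldl
        (fun (sufixes : PySem.Dict String (List String)) kv =>
          let sufix := pvSuf3 kv.2
          if sufixes.contains sufix then sufixes.modify sufix [] (fun l => l ++ [kv.1])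
          else sufixes.insert sufix [kv.1])
        PySem.Dict.empty
      = form.foldl
          (fun (d : PySem.Dict String (List String)) kv =>
            d.modify (pvSuf3 kv.2) [] (fun l => l ++ [kv.1]))
          PySem.Dict.empty := by
    have : ∀ (l : List (String × String)) (d : PySem.Dict String (List String)),
        l.foldl (fun sufixes kv =>
          let sufix := pvSuf3 kv.2
          if sufixes.contains sufix then sufixes.modify sufix [] (fun l => l ++ [kv.1])
          else sufixes.insert sufix [kv.1]) d
        = l.foldl (fun d kv => d.modify (pvSuf3 kv.2) [] (fun l => l ++ [kv.1])) d := by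
      intro l
      induction l with
      | nil => intro d; rfl
      | cons kv rest ih =>
          intro d
          simp only [List.foldl_cons]
          rw [pvStepA_eq_modify d kv, ih]
    exact this form PySem.Dict.empty
  rw [hfold]
  set D := form.foldl
      (fun (d : PySem.Dict String (List String)) kv =>
        d.modify (pvSuf3 kv.2) [] (fun l => l ++ [kv.1]))
      PySem.Dict.empty with hD
  have hkeysNodup : D.keys.Nodup := by
    rw [hD]
    exact PySem.Dict.nodup_keys_foldl_modify_key form (fun kv => pvSuf3 kv.2) []
      (fun _ kv l => l ++ [kv.1]) PySem.Dict.empty (by simp)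
  have hkeys : D.keys =
      form.foldl (fun sufs kv => PySem.Set.add sufs (pvSuf3 kv.2)) [] := by
    rw [hD, PySem.Dict.keys_foldl_modify_key form (fun kv => pvSuf3 kv.2) []
      (fun _ kv l => l ++ [kv.1]) PySem.Dict.empty]
    rw [← PySem.Set.update_map_eq_foldl_add]
    simp [PySem.Dict.keys_empty]
  have hgetD : ∀ c, D.getD c [] =
      (form.filter (fun kv => pvSuf3 kv.2 == c)).map (fun kv => kv.1) := by
    intro c
    have hmap : D = (form.map (fun kv => (pvSuf3 kv.2, kv.1))).foldl
        (fun (d : PySem.Dict String (List String)) p =>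
          d.modify p.1 [] (fun l => l ++ [p.2])) PySem.Dict.empty := by
      rw [hD, List.foldl_map]
    rw [hmap, PySem.Dict.getD_foldl_modify_append]
    simp [List.filter_map, Function.comp_def, List.map_map]
  rw [PySem.Dict.items_eq_map_keys D hkeysNodup []]
  rw [hkeys, ← pvSufsFold_eq]
  apply List.map_congr_left
  intro s _
  rw [hgetD s]

-- ===== VERDICT (by name: the statement is the Claim_ definition above) =====
theorem get_sufixes_spec : Claim_equal_get_sufixes := by
  intro form _ _
  unfold Spec_get_sufixes
  exact get_sufixes_eq_alt form
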